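-- pv_equiv track=rewrite | github.com/varinnair/google-foobar | Level 3/find_access_codes.py | answer
-- ===== SOURCE A (Python) =====
-- def find_multiples(l, num):
--     count = 0
--     for e in l:
--         if e % num == 0:
--             count += 1
--     return count
--
-- def find_divisibles(l, num):
--     count = 0
--     for e in l:
--         if num % e == 0:
--             count += 1
--     return count
--
-- def answer(l):
--     count = 0
--     i = 1
--     while i < len(l) - 1:
--         num_multiples = find_multiples(l[i+1:], l[i])
--         num_divisibles = find_divisibles(l[:i], l[i])
--         count += num_multiples * num_divisibles
--
--         i += 1
--     return count
-- ===== SOURCE B (Python) =====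
-- def answer(l):
--     # single left-to-right pass: for each element keep how many earlier
--     # elements divide it; a divisible pair (j,k) then contributes that
--     # stored count of the middle element to the triple total.
--     if len(l) < 3:
--         return 0
--     total = 0
--     pairs = []  # (value, number of earlier elements dividing it)
--     for x in l:
--         cx = 0
--         for y, cy in pairs:
--             if x % y == 0:
--                 cx += 1
--                 total += cy
--         pairs.append((x, cx))
--     return total
-- ===== Notes on version B (the rewrite author's own statement) =====
-- stated objective: alternative
-- what changed: Replaced A's per-middle rescans of the whole list (a prefix divisor count and a suffix multiple count recomputed from fresh slices for every middle index) by a single left-to-right pass that stores for each element the number of earlier divisors, so each divisible pair immediately contributes the middle element's stored count to the triple total.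
import Mathlib
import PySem

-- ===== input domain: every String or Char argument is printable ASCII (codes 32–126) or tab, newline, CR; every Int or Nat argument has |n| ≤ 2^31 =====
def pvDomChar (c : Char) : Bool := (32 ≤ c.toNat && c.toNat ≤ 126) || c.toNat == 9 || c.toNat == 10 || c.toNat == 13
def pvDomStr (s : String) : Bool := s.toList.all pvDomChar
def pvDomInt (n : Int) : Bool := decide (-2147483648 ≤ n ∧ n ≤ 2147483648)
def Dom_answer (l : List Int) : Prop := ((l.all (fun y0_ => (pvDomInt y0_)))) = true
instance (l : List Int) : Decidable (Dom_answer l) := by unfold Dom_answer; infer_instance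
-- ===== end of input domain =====

-- B replaces A's per-middle prefix/suffix rescans by a single left-to-right pass
-- that stores, for every element, the number of earlier elements dividing it.

-- ===== PORT A =====
def find_multiples (l : List Int) (num : Int) : Int :=
  l.foldl (fun count e => if PySem.Int.mod e num = 0 then count + 1 else count) 0

def find_divisibles (l : List Int) (num : Int) : Int :=
  l.foldl (fun count e => if PySem.Int.mod num e = 0 then count + 1 else count) 0

def answer (l : List Int) : Int :=
  (PySem.List.pyRange 1 ((l.length : Int) - 1) 1).foldl
    (fun count i =>
      let num_multiples := find_multiples (PySem.List.slice l (some (i + 1)) none) (PySem.List.pyGetD l i 0)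
      let num_divisibles := find_divisibles (PySem.List.slice l none (some i)) (PySem.List.pyGetD l i 0)
      count + num_multiples * num_divisibles)
    0

-- ===== PORT B =====
def answer_alt (l : List Int) : Int :=
  if l.length < 3 then 0
  else
    (l.foldl
      (fun (st : List (Int × Int) × Int) x =>
        let inner := st.1.foldl
          (fun (acc : Int × Int) (yc : Int × Int) =>
            if PySem.Int.mod x yc.1 = 0 then (acc.1 + 1, acc.2 + yc.2) else acc)
          (0, st.2)
        (st.1 ++ [(x, inner.1)], inner.2))
      ([], 0)).2

-- ===== PRECONDITION & SPEC =====
-- Pre_ excludes exactly the inputs where Python A raises ZeroDivisionError: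
-- lists of length ≥ 3 with a zero among all but the last element.
def Pre_answer (l : List Int) : Prop := l.length < 3 ∨ (0 : Int) ∉ l.dropLast
instance (l : List Int) : Decidable (Pre_answer l) := by unfold Pre_answer; infer_instance
def pvWitness_answer : List Int := [1, 2, 4, 6]

def Spec_answer (l : List Int) (out : Int) : Prop := out = answer_alt l
instance (l : List Int) (out : Int) : Decidable (Spec_answer l out) := by unfold Spec_answer; infer_instance

-- ===== CLAIM (what is proved, stated in full; the proofs are below) =====
def Claim_equal_answer : Prop := ∀ (l : List Int), Dom_answer l → Pre_answer l → Spec_answer l (answer l)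

-- ===== LEMMAS AND PROOFS =====

-- # of elements of a dividing x (Python-mod test), as an Int
def Pc (a : List Int) (x : Int) : Int := (a.countP (fun y => decide (PySem.Int.mod x y = 0)) : Int)
-- # of elements of b that x divides (Python-mod test), as an Int
def Sc (x : Int) (b : List Int) : Int := (b.countP (fun e => decide (PySem.Int.mod e x = 0)) : Int)
-- weighted sum of the stored counts of stored values dividing x
def WS (ps : List (Int × Int)) (x : Int) : Int :=
  (ps.map (fun yc => if PySem.Int.mod x yc.1 = 0 then yc.2 else 0)).sum

-- B's loop body, named for the proofs (definitionally the lambda in answer_alt)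
def bstep (st : List (Int × Int) × Int) (x : Int) : List (Int × Int) × Int :=
  let inner := st.1.foldl
    (fun (acc : Int × Int) (yc : Int × Int) =>
      if PySem.Int.mod x yc.1 = 0 then (acc.1 + 1, acc.2 + yc.2) else acc)
    (0, st.2)
  (st.1 ++ [(x, inner.1)], inner.2)

theorem answer_alt_def (l : List Int) :
    answer_alt l = if l.length < 3 then 0 else (l.foldl bstep ([], 0)).2 := rfl

-- A's shape as structural recursion: for each middle m, (#divisors before) * (#multiples after)
def G (a b : List Int) : Int :=
  match b with
  | [] => 0
  | m :: b' => Pc a m * Sc m b' + G (a ++ [m]) b'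

-- B's shape as structural recursion over the remaining list, given the stored pairs
def F (ps : List (Int × Int)) (r : List Int) : Int :=
  match r with
  | [] => 0
  | x :: r' => WS ps x + F (ps ++ [(x, Pc (ps.map Prod.fst) x)]) r'

theorem inner_fold_eq (x : Int) (ps : List (Int × Int)) (a b : Int) :
    ps.foldl
      (fun (acc : Int × Int) (yc : Int × Int) =>
        if PySem.Int.mod x yc.1 = 0 then (acc.1 + 1, acc.2 + yc.2) else acc)
      (a, b)
    = (a + Pc (ps.map Prod.fst) x, b + WS ps x) := by
  induction ps generalizing a b with
  | nil => simp [Pc, WS]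
  | cons yc t ih =>
      by_cases h : PySem.Int.mod x yc.1 = 0
      · simp [h, ih, Pc, WS]; constructor <;> ring
      · simp [h, ih, Pc, WS]

theorem bstep_eq (st : List (Int × Int) × Int) (x : Int) :
    bstep st x = (st.1 ++ [(x, Pc (st.1.map Prod.fst) x)], st.2 + WS st.1 x) := by
  simp [bstep, inner_fold_eq]

theorem b_fold_eq (r : List Int) (ps : List (Int × Int)) (t : Int) :
    (r.foldl bstep (ps, t)).2 = t + F ps r := by
  induction r generalizing ps t with
  | nil => simp [F]
  | cons x r' ih =>
      rw [List.foldl_cons, bstep_eq, ih]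
      simp [F, add_assoc]

theorem ws_split (x : Int) (r' : List Int) (ps : List (Int × Int)) :
    (ps.map (fun yc => yc.2 * Sc yc.1 (x :: r'))).sum
    = (ps.map (fun yc => yc.2 * Sc yc.1 r')).sum + WS ps x := by
  induction ps with
  | nil => simp [WS]
  | cons yc t ih =>
      by_cases h : PySem.Int.mod x yc.1 = 0 <;>
        simp [Sc, List.countP_cons, h, WS, mul_add] <;> simp [WS] at ih <;> omega

theorem F_eq_G (r : List Int) (ps : List (Int × Int)) :
    F ps r = (ps.map (fun yc => yc.2 * Sc yc.1 r)).sum + G (ps.map Prod.fst) r := by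
  induction r generalizing ps with
  | nil => simp [F, G, Sc]
  | cons x r' ih =>
      rw [F, ih, ws_split]
      simp [G, Pc, Sc]
      ring

theorem G_sum (b a : List Int) :
    G a b = ((List.range b.length).map
      (fun j => Pc (a ++ b.take j) (b.getD j 0) * Sc (b.getD j 0) (b.drop (j + 1)))).sum := by
  induction b generalizing a with
  | nil => simp [G]
  | cons x b' ih =>
      rw [G, ih (a ++ [x])]
      rw [List.length_cons, List.range_succ_eq_map]
      simp [List.map_map, Function.comp_def, List.append_assoc]

theorem find_multiples_eq (s : List Int) (num : Int) : find_multiples s num = Sc num s := by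
  simp [find_multiples, PySem.List.foldl_ite_add_one, Sc]

theorem find_divisibles_eq (s : List Int) (num : Int) : find_divisibles s num = Pc s num := by
  simp [find_divisibles, PySem.List.foldl_ite_add_one, Pc]

theorem sum_trim (f : Nat → Int) (n : Nat) (h0 : f 0 = 0) (hl : ∀ j, j + 1 = n → f j = 0) :
    ((List.range n).map f).sum = ((List.range (n - 2)).map (fun k => f (k + 1))).sum := by
  match n with
  | 0 => simp
  | 1 => simp [h0]
  | (m + 2) =>
      rw [List.range_succ]
      simp only [List.map_append, List.sum_append, hl (m + 1) rfl, List.map_cons, List.map_nil,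
        List.sum_cons, List.sum_nil, add_zero]
      rw [List.range_succ_eq_map]
      simp [h0, List.map_map, Function.comp_def]

theorem answer_eq_G (l : List Int) : answer l = G [] l := by
  have hfold := PySem.List.foldl_add
    (l := PySem.List.pyRange 1 ((l.length : Int) - 1) 1) (a := (0 : Int))
    (g := fun i => find_multiples (PySem.List.slice l (some (i + 1)) none) (PySem.List.pyGetD l i 0)
      * find_divisibles (PySem.List.slice l none (some i)) (PySem.List.pyGetD l i 0))
  rw [answer]
  rw [hfold, zero_add]
  rw [PySem.List.pyRange_one, List.map_map]
  have ht : (((l.length : Int) - 1) - 1).toNat = l.length - 2 := by omega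
  rw [ht]
  rw [G_sum l []]
  rw [sum_trim (fun j => Pc ([] ++ l.take j) (l.getD j 0) * Sc (l.getD j 0) (l.drop (j + 1)))
      l.length (by simp [Pc]) ?hl]
  case hl =>
    intro j hj
    have : l.drop (j + 1) = [] := by rw [hj]; simp
    simp [this, Sc]
  congr 1
  apply List.map_congr_left
  intro k _
  simp only [Function.comp_apply]
  have h1 : (1 : Int) + (k : Int) = ((k + 1 : Nat) : Int) := by push_cast; ring
  have h2 : ((k + 1 : Nat) : Int) + 1 = ((k + 2 : Nat) : Int) := by push_cast; ring
  rw [h1, h2, PySem.List.slice_from_natCast, PySem.List.slice_to_natCast,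
    PySem.List.pyGetD_natCast, find_multiples_eq, find_divisibles_eq]
  have h3 : k + 2 = (k + 1) + 1 := by omega
  rw [h3]
  simp [mul_comm]

theorem answer_eq_alt (l : List Int) : answer l = answer_alt l := by
  rw [answer_alt_def]
  by_cases h : l.length < 3
  · rw [if_pos h, answer]
    rw [PySem.List.pyRange_one_eq_nil (by omega)]
    rfl
  · rw [if_neg h, b_fold_eq, zero_add]
    rw [answer_eq_G, F_eq_G]
    simp

-- ===== VERDICT (by name: the statement is the Claim_ definition above) =====
theorem answer_spec : Claim_equal_answer := by
  intro l _ _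
  unfold Spec_answer
  exact answer_eq_alt l
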